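-- pv_equiv track=rewrite | github.com/Lukzegl/Podstawy-sztucznej-inteligencji | model_V1/bridge_bidding_model.py | parse_hand_pbn
-- ===== SOURCE A (Python) =====
-- def parse_hand_pbn(hand_str):
--
--     suits = {'S': [], 'H': [], 'D': [], 'C': []}
--     current_suit = None
--     for char in hand_str:
--         if char in 'SHDC':
--             current_suit = char
--         elif current_suit:
--             suits[current_suit].append(char)
--     return suits
-- ===== SOURCE B (Python) =====
-- def parse_hand_pbn(hand_str):
--     # Back-to-front single pass: scan the string right-to-left collecting the run of
--     # cards, and attach the run to the suit marker that precedes it.  No forward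
--     # "current suit" state; cards before the first suit marker are left in the run
--     # and dropped.
--     suits = {'S': [], 'H': [], 'D': [], 'C': []}
--     run = []
--     for ch in reversed(hand_str):
--         if ch in 'SHDC':
--             run.reverse()
--             suits[ch] = run + suits[ch]
--             run = []
--         else:
--             run.append(ch)
--     return suits
-- ===== Notes on version B (the rewrite author's own statement) =====
-- stated objective: alternative
-- what changed: Replaces A's forward scan with a mutable current_suit state (appending into the dict as it goes) by a single right-to-left pass that collects the run of card characters and attaches it to the suit marker found before it, with no current-suit state.
import Mathlib
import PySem

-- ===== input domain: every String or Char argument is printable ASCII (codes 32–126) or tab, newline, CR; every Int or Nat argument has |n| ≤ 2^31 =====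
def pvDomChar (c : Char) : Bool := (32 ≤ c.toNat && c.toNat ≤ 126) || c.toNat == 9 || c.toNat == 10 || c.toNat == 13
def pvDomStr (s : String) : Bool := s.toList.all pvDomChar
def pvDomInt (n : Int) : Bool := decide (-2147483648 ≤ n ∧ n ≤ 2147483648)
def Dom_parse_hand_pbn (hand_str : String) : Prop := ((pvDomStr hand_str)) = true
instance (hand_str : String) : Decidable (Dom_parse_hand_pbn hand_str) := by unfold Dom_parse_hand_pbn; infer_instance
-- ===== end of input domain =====

-- B replaces A's forward scan with a mutable current-suit state by a single right-to-left
-- pass that collects the run of card characters and attaches it to the preceding suit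
-- marker (alternative decomposition, same return value; same cost class).

-- ===== PORT A =====
-- A's initial dict {'S': [], 'H': [], 'D': [], 'C': []}
def pvInitSuits : PySem.Dict String (List String) :=
  PySem.Dict.ofList [("S", []), ("H", []), ("D", []), ("C", [])]

-- literal port of A's loop: state = (suits, current_suit)
def parse_hand_pbn (hand_str : String) : List (String × List String) :=
  let st :=
    hand_str.toList.foldl
      (fun (st : PySem.Dict String (List String) × Option String) c =>
        if "SHDC".toList.contains c then (st.1, some c.toString)
        else
          match st.2 with
          | some s => (st.1.modify s [] (fun l => l ++ [c.toString]), st.2)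
          | none => st)
      (pvInitSuits, none)
  st.1.items

-- ===== PORT B =====
-- literal port of Source B's reversed loop: state = (suits, run)
def parse_hand_pbn_alt (hand_str : String) : List (String × List String) :=
  let st :=
    hand_str.toList.reverse.foldl
      (fun (st : PySem.Dict String (List String) × List String) c =>
        if "SHDC".toList.contains c then
          (st.1.insert c.toString (st.2.reverse ++ st.1.getD c.toString []), [])
        else (st.1, st.2 ++ [c.toString]))
      (PySem.Dict.ofList [("S", []), ("H", []), ("D", []), ("C", [])], [])
  st.1.items

-- ===== PRECONDITION & SPEC =====
def Spec_parse_hand_pbn (hand_str : String) (out : List (String × List String)) : Prop := out = parse_hand_pbn_alt hand_str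
instance (hand_str : String) (out : List (String × List String)) : Decidable (Spec_parse_hand_pbn hand_str out) := by unfold Spec_parse_hand_pbn; infer_instance

-- ===== CLAIM (what is proved, stated in full; the proofs are below) =====
def Claim_equal_parse_hand_pbn : Prop := ∀ (hand_str : String), Dom_parse_hand_pbn hand_str → Spec_parse_hand_pbn hand_str (parse_hand_pbn hand_str)

-- ===== LEMMAS AND PROOFS =====

-- owner labelling of A's scan: the list of (current_suit, char) pairs A appends
def pvOwned : Option String → List Char → List (String × String)
  | _, [] => []
  | cur, c :: r =>
    if "SHDC".toList.contains c then pvOwned (some c.toString) r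
    else
      match cur with
      | some s => (s, c.toString) :: pvOwned (some s) r
      | none => pvOwned none r

def pvNonsuit (c : Char) : Bool := !"SHDC".toList.contains c

def pvKeys4 : List String := ["S", "H", "D", "C"]

-- proof-side recursive characterisation of B's right-to-left loop
def pvTaken : List Char → List String
  | [] => []
  | c :: r => if "SHDC".toList.contains c then [] else c.toString :: pvTaken r

def pvGo : List Char → PySem.Dict String (List String)
  | [] => PySem.Dict.ofList [("S", []), ("H", []), ("D", []), ("C", [])]
  | c :: rest =>
    let d := pvGo rest
    if "SHDC".toList.contains c then
      d.insert c.toString (pvTaken rest ++ d.getD c.toString [])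
    else d

-- unfolding helpers for pvOwned / pvNonsuit / pvGo on a cons
theorem pvOwned_cons_pos (c : Char) (r : List Char) (cur : Option String)
    (h : "SHDC".toList.contains c = true) :
    pvOwned cur (c :: r) = pvOwned (some c.toString) r := by
  cases cur <;> simp only [pvOwned, h, if_true]

theorem pvOwned_cons_none (c : Char) (r : List Char)
    (h : "SHDC".toList.contains c = false) :
    pvOwned none (c :: r) = pvOwned none r := by
  simp only [pvOwned, h, Bool.false_eq_true, if_false]

theorem pvOwned_cons_some (c : Char) (r : List Char) (s : String)
    (h : "SHDC".toList.contains c = false) :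
    pvOwned (some s) (c :: r) = (s, c.toString) :: pvOwned (some s) r := by
  simp only [pvOwned, h, Bool.false_eq_true, if_false]

theorem pvNonsuit_pos (c : Char) (h : "SHDC".toList.contains c = true) : pvNonsuit c = false := by
  simp only [pvNonsuit, h, Bool.not_true]

theorem pvNonsuit_neg (c : Char) (h : "SHDC".toList.contains c = false) : pvNonsuit c = true := by
  simp only [pvNonsuit, h, Bool.not_false]

theorem pvGo_cons_pos (c : Char) (r : List Char) (h : "SHDC".toList.contains c = true) :
    pvGo (c :: r) = (pvGo r).insert c.toString (pvTaken r ++ (pvGo r).getD c.toString []) := by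
  simp only [pvGo, h, if_true]

theorem pvGo_cons_neg (c : Char) (r : List Char) (h : "SHDC".toList.contains c = false) :
    pvGo (c :: r) = pvGo r := by
  simp only [pvGo, h, Bool.false_eq_true, if_false]

-- A's fold is the modify-fold over the owned pairs
theorem pvA_fold_eq (cs : List Char) :
    ∀ (d : PySem.Dict String (List String)) (cur : Option String),
    (cs.foldl
      (fun (st : PySem.Dict String (List String) × Option String) c =>
        if "SHDC".toList.contains c then (st.1, some c.toString)
        else
          match st.2 with
          | some s => (st.1.modify s [] (fun l => l ++ [c.toString]), st.2)
          | none => st)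
      (d, cur)).1
    = (pvOwned cur cs).foldl (fun d p => d.modify p.1 [] (fun l => l ++ [p.2])) d := by
  induction cs with
  | nil => intro d cur; rfl
  | cons c r ih =>
    intro d cur
    rw [List.foldl_cons]
    by_cases h : "SHDC".toList.contains c = true
    · rw [pvOwned_cons_pos c r cur h]
      simp only [h, if_true]
      exact ih d (some c.toString)
    · simp only [Bool.not_eq_true] at h
      cases cur with
      | none =>
        rw [pvOwned_cons_none c r h]
        simp only [h, Bool.false_eq_true, if_false]
        exact ih d none
      | some s =>
        rw [pvOwned_cons_some c r s h, List.foldl_cons]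
        simp only [h, Bool.false_eq_true, if_false]
        exact ih _ (some s)

-- every owner produced by the scan is one of the four keys
theorem pvOwned_fst_mem (cs : List Char) :
    ∀ (cur : Option String),
    (∀ s, cur = some s → s ∈ pvKeys4) →
    ∀ p ∈ pvOwned cur cs, p.1 ∈ pvKeys4 := by
  induction cs with
  | nil => intro cur _ p hp; simp [pvOwned] at hp
  | cons c r ih =>
    intro cur hcur p hp
    by_cases h : "SHDC".toList.contains c = true
    · rw [pvOwned_cons_pos c r cur h] at hp
      refine ih (some c.toString) ?_ p hp
      intro s hs
      injection hs with hs; subst hs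
      have hc : c = 'S' ∨ c = 'H' ∨ c = 'D' ∨ c = 'C' := by simpa using h
      rcases hc with rfl | rfl | rfl | rfl <;> decide
    · simp only [Bool.not_eq_true] at h
      cases cur with
      | none =>
        rw [pvOwned_cons_none c r h] at hp
        exact ih none (by simp) p hp
      | some s =>
        rw [pvOwned_cons_some c r s h] at hp
        rcases List.mem_cons.mp hp with hp | hp
        · subst hp; exact hcur s rfl
        · exact ih (some s) hcur p hp

-- pvOwned with no current suit drops the leading non-suit run
theorem pvOwned_none_dropWhile (cs : List Char) :
    pvOwned none cs = pvOwned none (cs.dropWhile pvNonsuit) := by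
  induction cs with
  | nil => rfl
  | cons c r ih =>
    rw [List.dropWhile_cons]
    by_cases h : "SHDC".toList.contains c = true
    · rw [pvNonsuit_pos c h]
      simp only [Bool.false_eq_true, if_false]
    · simp only [Bool.not_eq_true] at h
      rw [pvNonsuit_neg c h, if_pos rfl, pvOwned_cons_none c r h]
      exact ih

-- pvOwned with current suit s: the leading run is owned by s, then the state is irrelevant
theorem pvOwned_some_split (cs : List Char) (s : String) :
    pvOwned (some s) cs
      = (cs.takeWhile pvNonsuit).map (fun c => (s, c.toString))
        ++ pvOwned none (cs.dropWhile pvNonsuit) := by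
  induction cs with
  | nil => rfl
  | cons c r ih =>
    rw [List.takeWhile_cons, List.dropWhile_cons]
    by_cases h : "SHDC".toList.contains c = true
    · rw [pvNonsuit_pos c h]
      simp only [Bool.false_eq_true, if_false, List.map_nil, List.nil_append]
      rw [pvOwned_cons_pos c r (some s) h, pvOwned_cons_pos c r none h]
    · simp only [Bool.not_eq_true] at h
      rw [pvNonsuit_neg c h, if_pos rfl, if_pos rfl, pvOwned_cons_some c r s h, ih]
      simp only [List.map_cons, List.cons_append]

-- Source B's inner taken-loop collects the leading non-suit run
theorem pvTaken_eq (cs : List Char) :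
    pvTaken cs = (cs.takeWhile pvNonsuit).map (fun c => c.toString) := by
  induction cs with
  | nil => rfl
  | cons c r ih =>
    rw [List.takeWhile_cons]
    by_cases h : "SHDC".toList.contains c = true
    · rw [pvNonsuit_pos c h]
      simp only [pvTaken, h, if_true, Bool.false_eq_true, if_false, List.map_nil]
    · simp only [Bool.not_eq_true] at h
      rw [pvNonsuit_neg c h, if_pos rfl]
      simp only [pvTaken, h, Bool.false_eq_true, if_false, List.map_cons, ih]

-- keys of B's dict are always the four suit keys
theorem pvGo_keys (cs : List Char) : (pvGo cs).keys = pvKeys4 := by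
  induction cs with
  | nil => rfl
  | cons c r ih =>
    by_cases h : "SHDC".toList.contains c = true
    · have hc : c = 'S' ∨ c = 'H' ∨ c = 'D' ∨ c = 'C' := by simpa using h
      have hcont : (pvGo r).contains c.toString = true := by
        rw [PySem.Dict.contains_iff_mem_keys, ih]
        rcases hc with rfl | rfl | rfl | rfl <;> decide
      rw [pvGo_cons_pos c r h, PySem.Dict.keys_insert_of_contains _ _ hcont, ih]
    · simp only [Bool.not_eq_true] at h
      rw [pvGo_cons_neg c r h, ih]

-- B's lookups compute the owner-filtered card list
theorem pvGo_getD (cs : List Char) (s : String) :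
    (pvGo cs).getD s []
      = ((pvOwned none cs).filter (fun p => p.1 == s)).map (fun p => p.2) := by
  induction cs with
  | nil =>
    by_cases hmem : s ∈ pvKeys4
    · fin_cases hmem <;> rfl
    · simp only [pvKeys4, List.mem_cons, List.not_mem_nil, or_false] at hmem
      push Not at hmem
      obtain ⟨h1, h2, h3, h4⟩ := hmem
      have hd : pvGo [] = PySem.Dict.mk [("S", []), ("H", []), ("D", []), ("C", [])] := rfl
      rw [hd, PySem.Dict.getD_eq_get?_getD]
      simp [beq_iff_eq, Ne.symm h1, Ne.symm h2, Ne.symm h3, Ne.symm h4,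
        PySem.Dict.get?, pvOwned]
  | cons c r ih =>
    by_cases h : "SHDC".toList.contains c = true
    · rw [pvGo_cons_pos c r h, pvOwned_cons_pos c r none h, pvOwned_some_split,
        List.filter_append, List.map_append]
      by_cases hs : s = c.toString
      · subst hs
        rw [PySem.Dict.getD_insert_self, pvTaken_eq, ih, pvOwned_none_dropWhile r]
        simp [List.filter_map, Function.comp_def]
      · rw [PySem.Dict.getD_insert_of_ne _ _ _ hs, ih, pvOwned_none_dropWhile r]
        have hnil : ((r.takeWhile pvNonsuit).map (fun c' => (c.toString, c'.toString))).filter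
            (fun p => p.1 == s) = [] := by
          simp only [List.filter_map, Function.comp_def]
          rw [List.filter_eq_nil_iff.mpr (fun a _ => by
            simp only [beq_iff_eq]
            exact fun hcs => hs hcs.symm), List.map_nil]
        rw [hnil, List.map_nil, List.nil_append]
    · simp only [Bool.not_eq_true] at h
      rw [pvGo_cons_neg c r h, pvOwned_cons_none c r h]
      exact ih

-- keys of A's dict are always the four suit keys
theorem pvA_keys (cs : List Char) :
    ((pvOwned none cs).foldl (fun d p => d.modify p.1 [] (fun l => l ++ [p.2])) pvInitSuits).keys
      = pvKeys4 := by
  have hmem := pvOwned_fst_mem cs none (by simp)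
  have hupd : ∀ (l : List (String × String)),
      (∀ p ∈ l, p.1 ∈ pvKeys4) →
      PySem.Set.update pvKeys4 (l.map (fun p => p.1)) = pvKeys4 := by
    intro l
    induction l with
    | nil => intro _; rfl
    | cons p t ih =>
      intro hl
      have hp := hl p (List.mem_cons_self)
      have hadd : PySem.Set.add pvKeys4 p.1 = pvKeys4 := by
        simp only [pvKeys4, List.mem_cons, List.not_mem_nil, or_false] at hp
        rcases hp with h | h | h | h <;> rw [h] <;> decide
      have := ih (fun q hq => hl q (List.mem_cons_of_mem _ hq))
      simp only [PySem.Set.update] at this ⊢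
      rw [List.map_cons, List.foldl_cons, hadd]
      exact this
  have hkm : pvInitSuits.keys = pvKeys4 := rfl
  have hmain := PySem.Dict.keys_foldl_modify_key (pvOwned none cs)
    (fun p : String × String => p.1) ([] : List String)
    (fun _ p l => l ++ [p.2]) pvInitSuits
  simp only [] at hmain
  rw [hkm, hupd _ hmem] at hmain
  exact hmain

theorem pvA_getD (cs : List Char) (s : String) :
    ((pvOwned none cs).foldl (fun d p => d.modify p.1 [] (fun l => l ++ [p.2])) pvInitSuits).getD s []
      = pvInitSuits.getD s [] ++ ((pvOwned none cs).filter (fun p => p.1 == s)).map (fun p => p.2) :=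
  PySem.Dict.getD_foldl_modify_append (pvOwned none cs) pvInitSuits s

-- initial getD at each of the four keys is []
theorem pvInit_getD (s : String) (hs : s ∈ pvKeys4) :
    pvInitSuits.getD s [] = [] := by
  fin_cases hs <;> rfl

-- B's reversed loop computes (pvGo cs, reversed leading non-suit run)
theorem pvB_loop_eq (cs : List Char) :
    cs.reverse.foldl
      (fun (st : PySem.Dict String (List String) × List String) c =>
        if "SHDC".toList.contains c then
          (st.1.insert c.toString (st.2.reverse ++ st.1.getD c.toString []), [])
        else (st.1, st.2 ++ [c.toString]))
      (PySem.Dict.ofList [("S", []), ("H", []), ("D", []), ("C", [])], [])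
    = (pvGo cs, ((cs.takeWhile pvNonsuit).map (fun c => c.toString)).reverse) := by
  induction cs with
  | nil => rfl
  | cons c r ih =>
    rw [List.reverse_cons, List.foldl_append, ih, List.foldl_cons, List.foldl_nil,
      List.takeWhile_cons]
    by_cases h : "SHDC".toList.contains c = true
    · rw [pvNonsuit_pos c h, pvGo_cons_pos c r h, pvTaken_eq]
      simp only [h, if_true, Bool.false_eq_true, if_false, List.reverse_reverse,
        List.map_nil, List.reverse_nil]
    · simp only [Bool.not_eq_true] at h
      rw [pvNonsuit_neg c h, if_pos rfl, pvGo_cons_neg c r h]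
      simp only [h, Bool.false_eq_true, if_false, List.map_cons, List.reverse_cons]

-- ===== VERDICT (by name: the statement is the Claim_ definition above) =====
theorem parse_hand_pbn_spec : Claim_equal_parse_hand_pbn := by
  intro hand_str _
  unfold Spec_parse_hand_pbn parse_hand_pbn parse_hand_pbn_alt
  simp only []
  rw [pvA_fold_eq, pvB_loop_eq]
  set cs := hand_str.toList
  have hkA := pvA_keys cs
  have hkB := pvGo_keys cs
  have hndA : ((pvOwned none cs).foldl (fun d p => d.modify p.1 [] (fun l => l ++ [p.2])) pvInitSuits).keys.Nodup := by
    rw [hkA]; decide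
  have hndB : (pvGo cs).keys.Nodup := by rw [hkB]; decide
  rw [PySem.Dict.items_eq_map_keys _ hndA ([] : List String),
      PySem.Dict.items_eq_map_keys _ hndB ([] : List String), hkA, hkB]
  apply List.map_congr_left
  intro k hk
  rw [pvA_getD, pvGo_getD, pvInit_getD k hk]
  simp
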